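-- pv_equiv track=rewrite | github.com/pypi-data/pypi-mirror-76 | packages/bedevere/bedevere-0.1.1.tar.gz/bedevere-0.1.1/bedevere/discrete_sums.py | n_convolution
-- ===== SOURCE A (Python) =====
-- def convolution(x: dict, y: dict) -> dict:
--     """Return a distribution representing the sum of two distributions"""
--     z = {}
--
--     for j in range(sum([min(x), min(y)]), sum([max(x), max(y)]) + 1):
--         rolling_sum = 0
--
--         for k in x.keys():
--             if j - k in y:
--                 rolling_sum += x[k] * y[j - k]
--
--         if not rolling_sum == 0:
--             z[j] = rolling_sum
--
--     return z
--
-- def n_convolution(x: dict, n: int) -> dict: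
--     """Return a distribution representing the sum of n distributions x"""
--     assert n > 0
--
--     if n > 2:
--         return convolution(x, n_convolution(x, n-1))
--
--     elif n == 2:
--         return convolution(x, x)
--
--     elif n == 1:
--         return x
--
--     else:
--         raise RuntimeError
-- ===== SOURCE B (Python) =====
-- def convolution2(x: dict, y: dict) -> dict:
--     """Counter-style convolution: one pass over actual key pairs, then sort the support."""
--     z = {}
--     for k1, v1 in x.items():
--         for k2, v2 in y.items():
--             z[k1 + k2] = z.get(k1 + k2, 0) + v1 * v2
--     return {j: z[j] for j in sorted(z) if z[j] != 0}
--
-- def n_convolution(x: dict, n: int) -> dict: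
--     """Return a distribution representing the sum of n distributions x"""
--     assert n > 0
--     result = x
--     for _ in range(n - 1):
--         result = convolution2(x, result)
--     return result
-- ===== Notes on version B (the rewrite author's own statement) =====
-- stated objective: alternative
-- what changed: A's convolution scans every integer j in the whole range [min(x)+min(y), max(x)+max(y)] and tests membership per key; B's convolution makes one pass over the actual key pairs into a counter dict and then emits the sorted nonzero support, and the n-fold repetition becomes an explicit loop instead of recursion.
import Mathlib
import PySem

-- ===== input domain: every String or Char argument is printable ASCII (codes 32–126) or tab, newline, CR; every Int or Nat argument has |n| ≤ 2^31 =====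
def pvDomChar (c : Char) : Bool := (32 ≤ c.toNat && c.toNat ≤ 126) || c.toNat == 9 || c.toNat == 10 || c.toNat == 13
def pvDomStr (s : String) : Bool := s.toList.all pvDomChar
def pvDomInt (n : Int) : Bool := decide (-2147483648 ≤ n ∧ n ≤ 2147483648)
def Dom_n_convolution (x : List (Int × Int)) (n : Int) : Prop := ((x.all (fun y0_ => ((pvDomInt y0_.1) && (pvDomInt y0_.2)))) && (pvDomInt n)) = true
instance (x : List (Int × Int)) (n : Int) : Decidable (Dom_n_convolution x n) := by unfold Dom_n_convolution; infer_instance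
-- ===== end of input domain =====

-- B replaces A's range-scanning convolution (which walks every integer between min+min and
-- max+max testing membership) by a counter-based convolution over the actual key pairs
-- followed by sorting the support, applied iteratively (objective: alternative).


-- ===== PORT A =====
-- helper 'convolution(x, y)' of A; dicts are PySem.Dict over the given association lists.
-- min()/max() of an empty dict raise in Python (PySem min?/max? = none); the '.getD 0'
-- totalisation is only reached outside Pre_.
def pyconvolution (x y : List (Int × Int)) : List (Int × Int) :=
  let xd := PySem.Dict.mk x
  let yd := PySem.Dict.mk y
  let lo := ([(PySem.List.min? xd.keys (fun k => k)).getD 0,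
              (PySem.List.min? yd.keys (fun k => k)).getD 0] : List Int).sum
  let hi := ([(PySem.List.max? xd.keys (fun k => k)).getD 0,
              (PySem.List.max? yd.keys (fun k => k)).getD 0] : List Int).sum
  ((PySem.List.pyRange lo (hi + 1) 1).foldl (fun z j =>
    let rollingSum := xd.keys.foldl (fun r k =>
      if yd.contains (j - k) then r + xd.getD k 0 * yd.getD (j - k) 0 else r) 0
    if ¬ rollingSum = 0 then z.insert j rollingSum else z) PySem.Dict.empty).items

def n_convolution (x : List (Int × Int)) (n : Int) : List (Int × Int) :=
  if _h0 : n ≤ 0 then []        -- 'assert n > 0' fails: Python raises; excluded by Pre_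
  else if _h2 : n > 2 then pyconvolution x (n_convolution x (n - 1))
  else if n = 2 then pyconvolution x x
  else x                        -- n = 1 (the final 'raise RuntimeError' is unreachable for int n > 0)
termination_by n.toNat
decreasing_by omega

-- ===== PORT B =====
-- counter-based convolution: one pass over the key pairs, then the sorted nonzero support.
-- the dict comprehension iterates the distinct sorted keys, so it is the filterMap shown.
def convolution2 (x y : List (Int × Int)) : List (Int × Int) :=
  let z := x.foldl (fun z kv => y.foldl (fun z kw =>
      z.insert (kv.1 + kw.1) (z.getD (kv.1 + kw.1) 0 + kv.2 * kw.2)) z) PySem.Dict.empty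
  (PySem.List.sorted z.keys (fun k => k) false).filterMap (fun j =>
      if z.getD j 0 ≠ 0 then some (j, z.getD j 0) else none)

def n_convolution_alt (x : List (Int × Int)) (n : Int) : List (Int × Int) :=
  if n ≤ 0 then []              -- 'assert n > 0' fails: Python raises; excluded by Pre_
  else (PySem.List.pyRange 0 (n - 1) 1).foldl (fun result _ => convolution2 x result) x

-- ===== PRECONDITION & SPEC =====
-- Pre_ excludes (a) association lists with duplicate keys, which do not represent a Python
-- dict (the argument's type is dict[int, int]); (b) the inputs where A raises: n ≤ 0
-- (assert), x = {} with n ≥ 2 and all-zero-valued x with n ≥ 3 (min() of an empty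
-- intermediate dict raises ValueError).
def Pre_n_convolution (x : List (Int × Int)) (n : Int) : Prop :=
  (x.map Prod.fst).Nodup ∧ 1 ≤ n ∧ (2 ≤ n → x ≠ []) ∧ (3 ≤ n → ∃ kv ∈ x, kv.2 ≠ 0)
instance (x : List (Int × Int)) (n : Int) : Decidable (Pre_n_convolution x n) := by
  unfold Pre_n_convolution; infer_instance

def pvWitness_n_convolution : (List (Int × Int)) × Int := ([(0, 1), (1, 2)], 3)

def Spec_n_convolution (x : List (Int × Int)) (n : Int) (out : List (Int × Int)) : Prop := out = n_convolution_alt x n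
instance (x : List (Int × Int)) (n : Int) (out : List (Int × Int)) : Decidable (Spec_n_convolution x n out) := by unfold Spec_n_convolution; infer_instance

-- ===== CLAIM (what is proved, stated in full; the proofs are below) =====
def Claim_equal_n_convolution : Prop := ∀ (x : List (Int × Int)) (n : Int), Dom_n_convolution x n → Pre_n_convolution x n → Spec_n_convolution x n (n_convolution x n)

-- ===== LEMMAS AND PROOFS =====
-- semantic value of a distribution list at a point
def pvSem (d : List (Int × Int)) (j : Int) : Int :=
  (d.map (fun kv => if kv.1 = j then kv.2 else 0)).sum

-- distributions as elements of the ring ℤ[ℤ] (convolution = multiplication)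
noncomputable def pvF (d : List (Int × Int)) : AddMonoidAlgebra ℤ ℤ :=
  (d.map (fun kv => AddMonoidAlgebra.single kv.1 kv.2)).sum

-- the canonical shape both convolutions produce: strictly increasing keys, nonzero values
def pvCanon (d : List (Int × Int)) : Prop :=
  (d.map Prod.fst).Pairwise (· < ·) ∧ ∀ kv ∈ d, kv.2 ≠ 0

def pvPairs (a b : List (Int × Int)) : List ((Int × Int) × (Int × Int)) :=
  a.flatMap (fun kv => b.map (fun kw => (kv, kw)))

def pvCnt (a b : List (Int × Int)) (j : Int) : Int :=
  ((pvPairs a b).map (fun p => if p.1.1 + p.2.1 = j then p.1.2 * p.2.2 else 0)).sum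

theorem pvSem_nil (j : Int) : pvSem [] j = 0 := rfl

theorem pvSem_cons (kv : Int × Int) (d : List (Int × Int)) (j : Int) :
    pvSem (kv :: d) j = (if kv.1 = j then kv.2 else 0) + pvSem d j := by
  simp [pvSem]

theorem pvSem_eq_zero_of_not_mem {d : List (Int × Int)} {j : Int}
    (h : j ∉ d.map Prod.fst) : pvSem d j = 0 := by
  induction d with
  | nil => rfl
  | cons kv t ih =>
    simp only [List.map_cons, List.mem_cons] at h
    push_neg at h
    rw [pvSem_cons, if_neg (fun he => h.1 he.symm), ih h.2, add_zero]

theorem pvMem_of_sem_ne_zero {d : List (Int × Int)} {j : Int}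
    (h : pvSem d j ≠ 0) : j ∈ d.map Prod.fst := by
  by_contra hc; exact h (pvSem_eq_zero_of_not_mem hc)

theorem pvSem_of_mem_nodup {d : List (Int × Int)} {kv : Int × Int}
    (hm : kv ∈ d) (hnd : (d.map Prod.fst).Nodup) : pvSem d kv.1 = kv.2 := by
  induction d with
  | nil => simp at hm
  | cons hd t ih =>
    simp only [List.map_cons, List.nodup_cons] at hnd
    rcases List.mem_cons.1 hm with h | h
    · subst h
      rw [pvSem_cons, if_pos rfl,
        pvSem_eq_zero_of_not_mem hnd.1, add_zero]
    · have hne : hd.1 ≠ kv.1 := by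
        intro he
        exact hnd.1 (he ▸ (List.mem_map.2 ⟨kv, h, rfl⟩))
      rw [pvSem_cons, if_neg hne, ih h hnd.2, zero_add]

theorem pvF_apply (d : List (Int × Int)) (j : Int) : pvF d j = pvSem d j := by
  induction d with
  | nil => rfl
  | cons kv t ih =>
    show ((AddMonoidAlgebra.single kv.1 kv.2 : AddMonoidAlgebra ℤ ℤ) + pvF t) j = _
    rw [show ((AddMonoidAlgebra.single kv.1 kv.2 : AddMonoidAlgebra ℤ ℤ) + pvF t) j
        = (AddMonoidAlgebra.single kv.1 kv.2 : AddMonoidAlgebra ℤ ℤ) j + pvF t j from rfl,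
      ih, pvSem_cons, Finsupp.single_apply]

theorem pvCanon_nodup {d : List (Int × Int)} (h : pvCanon d) : (d.map Prod.fst).Nodup :=
  h.1.imp ne_of_lt

-- canonical lists with the same semantics are equal
theorem pvCanon_inj : ∀ {a b : List (Int × Int)}, pvCanon a → pvCanon b →
    (∀ j, pvSem a j = pvSem b j) → a = b := by
  intro a
  induction a with
  | nil =>
    intro b _ hb hs
    cases b with
    | nil => rfl
    | cons kv t =>
      exfalso
      have h0 : pvSem (kv :: t) kv.1 = kv.2 :=
        pvSem_of_mem_nodup (List.mem_cons_self) (pvCanon_nodup hb)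
      have := hs kv.1
      rw [pvSem_nil, h0] at this
      exact hb.2 kv List.mem_cons_self this.symm
  | cons kv t ih =>
    intro b ha hb hs
    cases b with
    | nil =>
      exfalso
      have h0 : pvSem (kv :: t) kv.1 = kv.2 :=
        pvSem_of_mem_nodup (List.mem_cons_self) (pvCanon_nodup ha)
      have := hs kv.1
      rw [pvSem_nil, h0] at this
      exact ha.2 kv List.mem_cons_self this
    | cons kw u =>
      -- heads have the minimal keys, hence agree
      have hminA : ∀ j ∈ (kv :: t).map Prod.fst, kv.1 ≤ j := by
        intro j hj
        rcases List.mem_cons.1 hj with h | h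
        · omega
        · have := (List.pairwise_cons.1 ha.1).1 j h; omega
      have hminB : ∀ j ∈ (kw :: u).map Prod.fst, kw.1 ≤ j := by
        intro j hj
        rcases List.mem_cons.1 hj with h | h
        · omega
        · have := (List.pairwise_cons.1 hb.1).1 j h; omega
      have hvA : pvSem (kv :: t) kv.1 = kv.2 :=
        pvSem_of_mem_nodup (List.mem_cons_self) (pvCanon_nodup ha)
      have hvB : pvSem (kw :: u) kw.1 = kw.2 :=
        pvSem_of_mem_nodup (List.mem_cons_self) (pvCanon_nodup hb)
      have hA_in_B : kv.1 ∈ (kw :: u).map Prod.fst := by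
        apply pvMem_of_sem_ne_zero
        rw [← hs kv.1, hvA]; exact ha.2 kv List.mem_cons_self
      have hB_in_A : kw.1 ∈ (kv :: t).map Prod.fst := by
        apply pvMem_of_sem_ne_zero
        rw [hs kw.1, hvB]; exact hb.2 kw List.mem_cons_self
      have hkey : kv.1 = kw.1 := le_antisymm (hminA _ hB_in_A) (hminB _ hA_in_B)
      have hval : kv.2 = kw.2 := by rw [← hvA, hs kv.1, hkey, hvB]
      have hhd : kv = kw := Prod.ext hkey hval
      have htail : t = u := by
        apply ih ⟨List.Pairwise.of_cons ha.1, fun p hp => ha.2 p (List.mem_cons_of_mem _ hp)⟩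
          ⟨List.Pairwise.of_cons hb.1, fun p hp => hb.2 p (List.mem_cons_of_mem _ hp)⟩
        intro j
        by_cases hj : j = kv.1
        · subst hj
          have h1 : pvSem t kv.1 = 0 := pvSem_eq_zero_of_not_mem (by
            intro hmem
            exact (List.nodup_cons.1 (pvCanon_nodup ha)).1 hmem)
          have h2 : pvSem u kv.1 = 0 := pvSem_eq_zero_of_not_mem (by
            intro hmem
            rw [hkey] at *
            exact (List.nodup_cons.1 (pvCanon_nodup hb)).1 hmem)
          rw [h1, h2]
        · have h1 := hs j
          rw [pvSem_cons, pvSem_cons] at h1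
          split_ifs at h1 <;> omega
      rw [hhd, htail]

theorem pvGetD_mk_eq_sem : ∀ {y : List (Int × Int)}, (y.map Prod.fst).Nodup → ∀ (t : Int),
    (PySem.Dict.mk y).getD t 0 = pvSem y t := by
  intro y
  induction y with
  | nil => intro _ t; simp [pvSem, PySem.Dict.getD_eq_get?_getD, PySem.Dict.get?]
  | cons kv r ih =>
    intro hnd t
    simp only [List.map_cons, List.nodup_cons] at hnd
    rw [PySem.Dict.getD_eq_get?_getD, PySem.Dict.get?_mk_cons, pvSem_cons]
    by_cases h : kv.1 = t
    · subst h
      simp only [beq_self_eq_true, if_pos, Option.getD_some, if_pos rfl]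
      rw [pvSem_eq_zero_of_not_mem hnd.1, add_zero]
    · rw [if_neg (by simpa using h), if_neg h, ← PySem.Dict.getD_eq_get?_getD,
        ih hnd.2 t, zero_add]

theorem pvContains_mk (y : List (Int × Int)) (t : Int) :
    (PySem.Dict.mk y).contains t = true ↔ t ∈ y.map Prod.fst := by
  rw [PySem.Dict.contains_iff_mem_keys]
  simp

theorem pvGetD_foldl_insert_add {β : Type} (l : List β) (f g : β → Int) :
    ∀ (d : PySem.Dict Int Int) (j : Int),
    (l.foldl (fun d p => d.insert (f p) (d.getD (f p) 0 + g p)) d).getD j 0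
      = d.getD j 0 + (l.map (fun p => if f p = j then g p else 0)).sum := by
  induction l with
  | nil => intro d j; simp
  | cons p t ih =>
    intro d j
    simp only [List.foldl_cons, List.map_cons, List.sum_cons]
    rw [ih]
    by_cases h : f p = j
    · subst h
      rw [PySem.Dict.getD_insert, if_pos rfl, if_pos rfl]
      ring
    · rw [PySem.Dict.getD_insert, if_neg (fun he => h he.symm), if_neg h]
      ring

theorem pvFoldl_nested {α β γ : Type} (a : List α) (b : List β)
    (step : γ → α → β → γ) :
    ∀ (init : γ),
    a.foldl (fun d kv => b.foldl (fun d kw => step d kv kw) d) init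
      = (a.flatMap (fun kv => b.map (fun kw => (kv, kw)))).foldl
          (fun d p => step d p.1 p.2) init := by
  induction a with
  | nil => intro init; rfl
  | cons kv t ih =>
    intro init
    simp only [List.foldl_cons, List.flatMap_cons, List.foldl_append, List.foldl_map]
    rw [ih]

-- the counter dict built by B's convolution, in flattened form
def pvZ (a b : List (Int × Int)) : PySem.Dict Int Int :=
  (pvPairs a b).foldl
    (fun d p => d.insert (p.1.1 + p.2.1) (d.getD (p.1.1 + p.2.1) 0 + p.1.2 * p.2.2))
    PySem.Dict.empty

theorem pvConv2_eq (a b : List (Int × Int)) :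
    convolution2 a b = (PySem.List.sorted (pvZ a b).keys (fun k => k) false).filterMap
      (fun j => if (pvZ a b).getD j 0 ≠ 0 then some (j, (pvZ a b).getD j 0) else none) := by
  unfold convolution2 pvZ pvPairs
  rw [pvFoldl_nested]

theorem pvZ_getD (a b : List (Int × Int)) (j : Int) :
    (pvZ a b).getD j 0 = pvCnt a b j := by
  unfold pvZ pvCnt
  rw [pvGetD_foldl_insert_add (pvPairs a b) (fun p => p.1.1 + p.2.1) (fun p => p.1.2 * p.2.2)
    PySem.Dict.empty j]
  simp

theorem pvZ_keys (a b : List (Int × Int)) :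
    (pvZ a b).keys = PySem.Set.ofList ((pvPairs a b).map (fun p => p.1.1 + p.2.1)) := by
  unfold pvZ
  rw [PySem.Dict.keys_foldl_insert_key (pvPairs a b) (fun p => p.1.1 + p.2.1)]
  simp [PySem.Set.update, PySem.Set.ofList_eq_foldl]

theorem pvZ_keys_nodup (a b : List (Int × Int)) : (pvZ a b).keys.Nodup := by
  unfold pvZ
  exact PySem.Dict.nodup_keys_foldl_insert_key _ _ _ _ PySem.Dict.nodup_keys_empty

theorem pvZ_keys_support {a b : List (Int × Int)} {j : Int}
    (h : pvCnt a b j ≠ 0) : j ∈ (pvZ a b).keys := by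
  rw [pvZ_keys, PySem.Set.mem_ofList]
  by_contra hc
  apply h
  unfold pvCnt
  apply List.sum_eq_zero
  intro x hx
  rcases List.mem_map.1 hx with ⟨p, hp, rfl⟩
  by_cases he : p.1.1 + p.2.1 = j
  · exact absurd (List.mem_map.2 ⟨p, hp, he⟩) hc
  · rw [if_neg he]

theorem pvSem_filterMap (c : Int → Int) (t : Int) :
    ∀ (l : List Int), l.Nodup →
    pvSem (l.filterMap (fun j => if c j ≠ 0 then some (j, c j) else none)) t
      = if t ∈ l ∧ c t ≠ 0 then c t else 0 := by
  intro l
  induction l with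
  | nil => intro _; simp [pvSem]
  | cons j0 r ih =>
    intro hnd
    rcases List.nodup_cons.1 hnd with ⟨hj0, hr⟩
    by_cases hc : c j0 ≠ 0
    · rw [List.filterMap_cons_some (by rw [if_pos hc]), pvSem_cons, ih hr]
      by_cases ht : j0 = t
      · subst ht
        rw [if_pos rfl, if_neg (by intro hx; exact hj0 hx.1),
          if_pos ⟨List.mem_cons_self, hc⟩, add_zero]
      · rw [if_neg ht, zero_add]
        have hne : ¬ t = j0 := fun h => ht h.symm
        simp [List.mem_cons, hne]
    · rw [List.filterMap_cons_none (by rw [if_neg hc]), ih hr]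
      push_neg at hc
      by_cases ht : j0 = t
      · subst ht
        simp [List.mem_cons, hc]
      · have hne : ¬ t = j0 := fun h => ht h.symm
        simp [List.mem_cons, hne]

theorem pvSorted_pairwise_lt {l : List Int} (hnd : l.Nodup) :
    (PySem.List.sorted l (fun k => k) false).Pairwise (· < ·) := by
  have hle : (PySem.List.sorted l (fun k => k) false).Pairwise (fun a b => a ≤ b) :=
    PySem.List.sorted_pairwise l (fun k => k)
  have hnd2 : (PySem.List.sorted l (fun k => k) false).Nodup :=
    ((PySem.List.sorted_perm l (fun k => k) false).nodup_iff).2 hnd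
  exact (hle.and hnd2).imp (fun h => lt_of_le_of_ne h.1 h.2)

theorem pvConv2_sem (a b : List (Int × Int)) (t : Int) :
    pvSem (convolution2 a b) t = pvCnt a b t := by
  rw [pvConv2_eq]
  have hnd : (PySem.List.sorted (pvZ a b).keys (fun k => k) false).Nodup :=
    ((PySem.List.sorted_perm _ _ _).nodup_iff).2 (pvZ_keys_nodup a b)
  have := pvSem_filterMap (fun j => (pvZ a b).getD j 0) t _ hnd
  simp only at this
  rw [this]
  by_cases hc : pvCnt a b t = 0
  · rw [if_neg (by rw [pvZ_getD]; intro hx; exact hx.2 hc), hc]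
  · rw [if_pos ⟨(PySem.List.mem_sorted _ _ _ _).2 (pvZ_keys_support hc),
      by rw [pvZ_getD]; exact hc⟩, pvZ_getD]

theorem pvFilterMap_keys (l : List Int) (c : Int → Int) :
    (l.filterMap (fun j => if c j ≠ 0 then some (j, c j) else none)).map Prod.fst
      = l.filter (fun j => decide (c j ≠ 0)) := by
  induction l with
  | nil => rfl
  | cons j0 r ih =>
    by_cases hc : c j0 ≠ 0
    · rw [List.filterMap_cons_some (by rw [if_pos hc]), List.map_cons, ih,
        List.filter_cons_of_pos (by simpa using hc)]
    · rw [List.filterMap_cons_none (by rw [if_neg hc]), ih,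
        List.filter_cons_of_neg (by simpa using hc)]

theorem pvCanon_filterMap {l : List Int} (c : Int → Int) (h : l.Pairwise (· < ·)) :
    pvCanon (l.filterMap (fun j => if c j ≠ 0 then some (j, c j) else none)) := by
  constructor
  · rw [pvFilterMap_keys]
    exact h.sublist List.filter_sublist
  · intro kv hkv
    rcases List.mem_filterMap.1 hkv with ⟨j, _, hj⟩
    by_cases hc : c j ≠ 0
    · rw [if_pos hc] at hj
      cases hj
      exact hc
    · rw [if_neg hc] at hj
      cases hj

theorem pvConv2_canon (a b : List (Int × Int)) : pvCanon (convolution2 a b) := by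
  rw [pvConv2_eq]
  exact pvCanon_filterMap _ (pvSorted_pairwise_lt (pvZ_keys_nodup a b))

theorem pvSingle_mul_F (kv : Int × Int) (b : List (Int × Int)) :
    (AddMonoidAlgebra.single kv.1 kv.2 : AddMonoidAlgebra ℤ ℤ) * pvF b
      = (b.map (fun kw => AddMonoidAlgebra.single (kv.1 + kw.1) (kv.2 * kw.2))).sum := by
  unfold pvF
  induction b with
  | nil => simp
  | cons kw u ihb =>
    simp only [List.map_cons, List.sum_cons, mul_add, ihb,
      AddMonoidAlgebra.single_mul_single]

theorem pvF_mul (a b : List (Int × Int)) :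
    pvF a * pvF b = ((pvPairs a b).map (fun p =>
      AddMonoidAlgebra.single (p.1.1 + p.2.1) (p.1.2 * p.2.2))).sum := by
  induction a with
  | nil => simp [pvF, pvPairs]
  | cons kv t ih =>
    show ((AddMonoidAlgebra.single kv.1 kv.2 : AddMonoidAlgebra ℤ ℤ) + pvF t) * pvF b = _
    rw [add_mul, ih, pvSingle_mul_F]
    unfold pvPairs
    rw [List.flatMap_cons, List.map_append, List.sum_append, List.map_map]
    rfl

theorem pvListSum_apply (l : List (AddMonoidAlgebra ℤ ℤ)) (j : Int) :
    (l.sum) j = (l.map (fun t => t j)).sum := by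
  induction l with
  | nil => rfl
  | cons a t ih => simp [ih]

theorem pvF_mul_apply (a b : List (Int × Int)) (j : Int) :
    (pvF a * pvF b) j = pvCnt a b j := by
  rw [pvF_mul, pvListSum_apply, List.map_map]
  apply congrArg List.sum
  apply List.map_congr_left
  intro p _
  simp only [Function.comp_apply]
  exact Finsupp.single_apply

theorem pvConv2_F (a b : List (Int × Int)) :
    pvF (convolution2 a b) = pvF a * pvF b :=
  Finsupp.ext fun j => by rw [pvF_apply, pvConv2_sem, ← pvF_mul_apply]

-- A's inner loop (rolling_sum) and range bounds
def pvSA (x y : List (Int × Int)) (j : Int) : Int :=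
  (PySem.Dict.mk x).keys.foldl (fun r k =>
    if (PySem.Dict.mk y).contains (j - k)
    then r + (PySem.Dict.mk x).getD k 0 * (PySem.Dict.mk y).getD (j - k) 0 else r) 0

def pvLo (x y : List (Int × Int)) : Int :=
  (PySem.List.min? (PySem.Dict.mk x).keys (fun k => k)).getD 0 +
  (PySem.List.min? (PySem.Dict.mk y).keys (fun k => k)).getD 0

def pvHi (x y : List (Int × Int)) : Int :=
  (PySem.List.max? (PySem.Dict.mk x).keys (fun k => k)).getD 0 +
  (PySem.List.max? (PySem.Dict.mk y).keys (fun k => k)).getD 0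

theorem pvDictFold_items (s : Int → Int) :
    ∀ (l : List Int) (d : PySem.Dict Int Int), l.Nodup → (∀ j ∈ l, d.contains j = false) →
    (l.foldl (fun z j => if ¬ s j = 0 then z.insert j (s j) else z) d).items
      = d.items ++ l.filterMap (fun j => if s j ≠ 0 then some (j, s j) else none) := by
  intro l
  induction l with
  | nil => intro d _ _; simp
  | cons j0 r ih =>
    intro d hnd hc
    rcases List.nodup_cons.1 hnd with ⟨hj0, hr⟩
    simp only [List.foldl_cons]
    by_cases hs : s j0 = 0
    · rw [if_neg (by simpa using hs),
        ih d hr (fun j hj => hc j (List.mem_cons_of_mem _ hj)),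
        List.filterMap_cons_none (by rw [if_neg (by simpa using hs)])]
    · rw [if_pos (by simpa using hs),
        ih (d.insert j0 (s j0)) hr (fun j hj => by
          rw [PySem.Dict.contains_insert]
          have : (j == j0) = false := by
            simp only [beq_eq_false_iff_ne, ne_eq]
            intro he; exact hj0 (he ▸ hj)
          rw [this, hc j (List.mem_cons_of_mem _ hj)]; rfl),
        PySem.Dict.items_insert_of_not_contains _ _ (hc j0 List.mem_cons_self),
        List.filterMap_cons_some (by rw [if_pos hs]), List.append_assoc, List.singleton_append]

theorem pvConvA_eq (x y : List (Int × Int)) :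
    pyconvolution x y = (PySem.List.pyRange (pvLo x y) (pvHi x y + 1) 1).filterMap
      (fun j => if pvSA x y j ≠ 0 then some (j, pvSA x y j) else none) := by
  unfold pyconvolution
  simp only [List.sum_cons, List.sum_nil, add_zero]
  have h := pvDictFold_items (pvSA x y) (PySem.List.pyRange (pvLo x y) (pvHi x y + 1) 1)
    PySem.Dict.empty (PySem.List.nodup_pyRange_one _ _) (fun j _ => by simp)
  exact h.trans (List.nil_append _)

theorem pvSA_as_sum (x y : List (Int × Int)) (j : Int) :
    pvSA x y j = (x.map (fun kv =>
      if (PySem.Dict.mk y).contains (j - kv.1) = true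
      then (PySem.Dict.mk x).getD kv.1 0 * (PySem.Dict.mk y).getD (j - kv.1) 0 else 0)).sum := by
  unfold pvSA
  rw [show (PySem.Dict.mk x).keys = x.map Prod.fst from by simp]
  rw [show (fun (r : Int) k => if (PySem.Dict.mk y).contains (j - k) = true
        then r + (PySem.Dict.mk x).getD k 0 * (PySem.Dict.mk y).getD (j - k) 0 else r)
      = fun (r : Int) k => r + (if (PySem.Dict.mk y).contains (j - k) = true
        then (PySem.Dict.mk x).getD k 0 * (PySem.Dict.mk y).getD (j - k) 0 else 0) from
    funext fun r => funext fun k => by split_ifs <;> simp]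
  rw [PySem.List.foldl_add, List.map_map, zero_add]
  rfl

theorem pvCnt_eq_map (x y : List (Int × Int)) (j : Int) :
    pvCnt x y j = (x.map (fun kv => kv.2 * pvSem y (j - kv.1))).sum := by
  unfold pvCnt pvPairs
  induction x with
  | nil => rfl
  | cons kv t ih =>
    rw [List.flatMap_cons, List.map_append, List.sum_append, ih, List.map_cons, List.sum_cons]
    congr 1
    rw [List.map_map]
    rw [show pvSem y (j - kv.1)
        = (y.map (fun kw => if kw.1 = j - kv.1 then kw.2 else 0)).sum from rfl]
    rw [← List.sum_map_mul_left]
    apply congrArg List.sum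
    apply List.map_congr_left
    intro kw _
    simp only [Function.comp_apply]
    have hiff : (kv.1 + kw.1 = j) ↔ (kw.1 = j - kv.1) := by omega
    by_cases h : kw.1 = j - kv.1
    · rw [if_pos (hiff.2 h), if_pos h]
    · rw [if_neg (fun hh => h (hiff.1 hh)), if_neg h, mul_zero]

theorem pvSA_eq {x y : List (Int × Int)} (hx : (x.map Prod.fst).Nodup)
    (hy : (y.map Prod.fst).Nodup) (j : Int) : pvSA x y j = pvCnt x y j := by
  rw [pvSA_as_sum, pvCnt_eq_map]
  apply congrArg List.sum
  apply List.map_congr_left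
  intro kv hkv
  by_cases hm : (j - kv.1) ∈ y.map Prod.fst
  · rw [if_pos ((pvContains_mk y _).2 hm), pvGetD_mk_eq_sem hx kv.1,
      pvGetD_mk_eq_sem hy (j - kv.1), pvSem_of_mem_nodup hkv hx]
  · rw [if_neg (by
      intro hcon
      exact hm ((pvContains_mk y _).1 hcon)),
      pvSem_eq_zero_of_not_mem hm, mul_zero]

theorem pvSA_support {x y : List (Int × Int)} (hx : x ≠ []) (hy : y ≠ []) {j : Int}
    (h : pvSA x y j ≠ 0) : pvLo x y ≤ j ∧ j < pvHi x y + 1 := by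
  rw [pvSA_as_sum] at h
  -- some addend is nonzero
  have hex : ∃ kv ∈ x, (PySem.Dict.mk y).contains (j - kv.1) = true := by
    by_contra hc
    push_neg at hc
    apply h
    apply List.sum_eq_zero
    intro v hv
    rcases List.mem_map.1 hv with ⟨kv, hkv, rfl⟩
    rw [if_neg (by
      intro hcon
      exact (hc kv hkv) hcon)]
  rcases hex with ⟨kv, hkv, hcon⟩
  have hky : (j - kv.1) ∈ (PySem.Dict.mk y).keys :=
    (PySem.Dict.contains_iff_mem_keys _ _).1 hcon
  have hkx : kv.1 ∈ (PySem.Dict.mk x).keys := by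
    simp only [PySem.Dict.keys_mk]
    exact List.mem_map.2 ⟨kv, hkv, rfl⟩
  have hxe : (PySem.Dict.mk x).keys ≠ [] := fun he => by rw [he] at hkx; exact absurd hkx (List.not_mem_nil)
  have hye : (PySem.Dict.mk y).keys ≠ [] := fun he => by rw [he] at hky; exact absurd hky (List.not_mem_nil)
  obtain ⟨mx, hmx⟩ : ∃ m, PySem.List.min? (PySem.Dict.mk x).keys (fun k => k) = some m := by
    cases hcase : PySem.List.min? (PySem.Dict.mk x).keys (fun k => k) with
    | none => exact absurd ((PySem.List.min?_eq_none_iff _ _).1 hcase) hxe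
    | some m => exact ⟨m, rfl⟩
  obtain ⟨my, hmy⟩ : ∃ m, PySem.List.min? (PySem.Dict.mk y).keys (fun k => k) = some m := by
    cases hcase : PySem.List.min? (PySem.Dict.mk y).keys (fun k => k) with
    | none => exact absurd ((PySem.List.min?_eq_none_iff _ _).1 hcase) hye
    | some m => exact ⟨m, rfl⟩
  obtain ⟨Mx, hMx⟩ : ∃ m, PySem.List.max? (PySem.Dict.mk x).keys (fun k => k) = some m := by
    cases hcase : PySem.List.max? (PySem.Dict.mk x).keys (fun k => k) with
    | none => exact absurd ((PySem.List.max?_eq_none_iff _ _).1 hcase) hxe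
    | some m => exact ⟨m, rfl⟩
  obtain ⟨My, hMy⟩ : ∃ m, PySem.List.max? (PySem.Dict.mk y).keys (fun k => k) = some m := by
    cases hcase : PySem.List.max? (PySem.Dict.mk y).keys (fun k => k) with
    | none => exact absurd ((PySem.List.max?_eq_none_iff _ _).1 hcase) hye
    | some m => exact ⟨m, rfl⟩
  have h1 := PySem.List.min?_isMin hmx kv.1 hkx
  have h2 := PySem.List.min?_isMin hmy (j - kv.1) hky
  have h3 := PySem.List.max?_isMax hMx kv.1 hkx
  have h4 := PySem.List.max?_isMax hMy (j - kv.1) hky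
  unfold pvLo pvHi
  rw [hmx, hmy, hMx, hMy]
  simp only [Option.getD_some]
  omega

theorem pvSA_zero_left {y : List (Int × Int)} (j : Int) : pvSA [] y j = 0 := rfl

theorem pvSA_zero_right {x : List (Int × Int)} (j : Int) : pvSA x [] j = 0 := by
  rw [pvSA_as_sum]
  apply List.sum_eq_zero
  intro v hv
  rcases List.mem_map.1 hv with ⟨kv, _, rfl⟩
  rw [if_neg (by
    intro hcon
    simpa using (pvContains_mk [] _).1 hcon)]

theorem pvConvA_sem {x y : List (Int × Int)} (hx : (x.map Prod.fst).Nodup)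
    (hy : (y.map Prod.fst).Nodup) (t : Int) :
    pvSem (pyconvolution x y) t = pvCnt x y t := by
  rw [pvConvA_eq, pvSem_filterMap _ _ _ (PySem.List.nodup_pyRange_one _ _), ← pvSA_eq hx hy]
  by_cases hsa : pvSA x y t = 0
  · rw [if_neg (fun hp => hp.2 hsa), hsa]
  · by_cases hxe : x = []
    · exact absurd (hxe ▸ pvSA_zero_left t) hsa
    by_cases hye : y = []
    · exact absurd (hye ▸ pvSA_zero_right t) hsa
    have hrange := pvSA_support hxe hye hsa
    rw [if_pos ⟨PySem.List.mem_pyRange_one.2 hrange, hsa⟩]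

theorem pvConvA_canon (x y : List (Int × Int)) : pvCanon (pyconvolution x y) := by
  rw [pvConvA_eq]
  exact pvCanon_filterMap _ (PySem.List.pairwise_lt_pyRange_one _ _)

theorem pvConvA_eq_conv2 {x y : List (Int × Int)} (hx : (x.map Prod.fst).Nodup)
    (hy : (y.map Prod.fst).Nodup) : pyconvolution x y = convolution2 x y :=
  pvCanon_inj (pvConvA_canon x y) (pvConv2_canon x y)
    (fun j => by rw [pvConvA_sem hx hy, pvConv2_sem])

theorem pvA_eq (x : List (Int × Int)) (n : Int) :
    n_convolution x n = if n ≤ 0 then []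
      else if n > 2 then pyconvolution x (n_convolution x (n - 1))
      else if n = 2 then pyconvolution x x else x := by
  rw [n_convolution]
  split_ifs <;> rfl

theorem pvA_char (x : List (Int × Int)) (hx : (x.map Prod.fst).Nodup) :
    ∀ n : Int, 2 ≤ n → pvCanon (n_convolution x n) ∧
      pvF (n_convolution x n) = pvF x ^ n.toNat := by
  intro n hn
  induction n, hn using Int.le_induction with
  | base =>
    rw [pvA_eq]
    norm_num
    rw [pvConvA_eq_conv2 hx hx]
    refine ⟨pvConv2_canon x x, ?_⟩
    rw [pvConv2_F, show ((2 : Int).toNat) = 2 from rfl, sq]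
  | succ n hn ih =>
    have hnd' : ((n_convolution x n).map Prod.fst).Nodup := pvCanon_nodup ih.1
    rw [pvA_eq, if_neg (by omega), if_pos (by omega),
      show n + 1 - 1 = n from by ring, pvConvA_eq_conv2 hx hnd']
    refine ⟨pvConv2_canon _ _, ?_⟩
    rw [pvConv2_F, ih.2, show ((n + 1 : Int).toNat) = n.toNat + 1 from by omega, pow_succ,
      mul_comm]

-- B's loop, as a structural recursion
def pvBfold (x : List (Int × Int)) : Nat → List (Int × Int)
  | 0 => x
  | k + 1 => convolution2 x (pvBfold x k)

theorem pvBfold_eq (x : List (Int × Int)) : ∀ (k : Nat),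
    (PySem.List.pyRange 0 (k : Int) 1).foldl (fun result _ => convolution2 x result) x
      = pvBfold x k := by
  intro k
  induction k with
  | zero => rfl
  | succ k ih =>
    rw [show ((k + 1 : Nat) : Int) = (k : Int) + 1 from by push_cast; ring,
      PySem.List.pyRange_one_succ_right (Int.natCast_nonneg k),
      List.foldl_append, ih]
    rfl

theorem pvB_char (x : List (Int × Int)) : ∀ (k : Nat), 1 ≤ k →
    pvCanon (pvBfold x k) ∧ pvF (pvBfold x k) = pvF x ^ (k + 1) := by
  intro k hk
  induction k, hk using Nat.le_induction with
  | base =>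
    refine ⟨pvConv2_canon _ _, ?_⟩
    show pvF (convolution2 x x) = _
    rw [pvConv2_F, sq]
  | succ k hk ih =>
    refine ⟨pvConv2_canon _ _, ?_⟩
    show pvF (convolution2 x (pvBfold x k)) = _
    rw [pvConv2_F, ih.2]
    ring

-- ===== VERDICT (by name: the statement is the Claim_ definition above) =====
theorem n_convolution_spec : Claim_equal_n_convolution := by
  unfold Claim_equal_n_convolution
  intro x n _dom hpre
  rcases hpre with ⟨hnd, h1, _h2, _h3⟩
  unfold Spec_n_convolution
  by_cases hn1 : n = 1
  · subst hn1
    rw [pvA_eq]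
    unfold n_convolution_alt
    norm_num
  · have hn2 : 2 ≤ n := by omega
    have hA := pvA_char x hnd n hn2
    have hBeq : n_convolution_alt x n = pvBfold x (n - 1).toNat := by
      unfold n_convolution_alt
      rw [if_neg (by omega)]
      conv_lhs => rw [show n - 1 = ((n - 1).toNat : Int) from by omega]
      rw [pvBfold_eq]
    have hB := pvB_char x (n - 1).toNat (by omega)
    have hBc : pvCanon (n_convolution_alt x n) := by rw [hBeq]; exact hB.1
    have hBF : pvF (n_convolution_alt x n) = pvF x ^ n.toNat := by
      rw [hBeq, hB.2, show (n - 1).toNat + 1 = n.toNat from by omega]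
    exact pvCanon_inj hA.1 hBc (fun j => by
      rw [← pvF_apply, ← pvF_apply, hA.2, hBF])
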